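-- pv_equiv track=rewrite | github.com/Fleeting198/-The-Practice-of-Computing-Using-Python- | Chap06/programing/01.py | puzzle_b
-- ===== SOURCE A (Python) =====
-- def puzzle_b(wordList):
--     strExam = "lmnopqrstuv"
--     wordList = list(filter(lambda x: x.islower() and '-' not in x, wordList))  # 初步筛选
--     listAnswer = wordList[:]
--
--     # 进一步筛选
--     for word in wordList:
--         for ch in strExam:
--             if ch not in word:
--                 listAnswer.remove(word)
--                 break
--
--     return listAnswer
-- ===== SOURCE B (Python) =====
-- def puzzle_b(wordList):
--     required = set("lmnopqrstuv")
--     return [w for w in wordList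
--             if w.islower() and '-' not in w and required <= set(w)]
-- ===== Notes on version B (the rewrite author's own statement) =====
-- stated objective: faster
-- what changed: B replaces A's copy-then-remove scheme (loop over words with an inner char loop calling list.remove on a shadow copy) by a single comprehension that keeps a word iff a precomputed required-character set is a subset of the word's character set.
import Mathlib
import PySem

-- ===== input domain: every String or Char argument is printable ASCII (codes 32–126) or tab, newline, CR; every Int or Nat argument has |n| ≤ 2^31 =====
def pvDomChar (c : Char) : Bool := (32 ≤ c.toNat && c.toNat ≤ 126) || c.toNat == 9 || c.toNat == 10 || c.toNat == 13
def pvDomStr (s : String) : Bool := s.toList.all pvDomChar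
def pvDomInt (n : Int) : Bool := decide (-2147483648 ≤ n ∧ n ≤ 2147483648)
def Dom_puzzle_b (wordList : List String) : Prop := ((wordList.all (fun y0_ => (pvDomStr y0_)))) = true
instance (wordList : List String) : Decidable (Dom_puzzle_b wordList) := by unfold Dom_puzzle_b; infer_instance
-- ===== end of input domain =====

-- B keeps a word in ONE comprehension pass iff the precomputed required-character set is a subset of
-- the word's character set, replacing A's copy-then-remove loop with an inner char loop; objective: faster.

-- s.islower() for ASCII strings: at least one lowercase letter and no uppercase letter
-- (exact on the printable-ASCII domain, where cased characters are exactly a-z and A-Z)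
def pyStrIslower (s : String) : Bool :=
  s.toList.any PySem.Chars.islower && !(s.toList.any PySem.Chars.isupper)

-- ===== PORT A =====
def puzzle_b (wordList : List String) : List String :=
  let strExam := "lmnopqrstuv"
  let wl := wordList.filter (fun x => pyStrIslower x && !(PySem.Str.isIn "-" x))
  let listAnswer := wl
  -- for word in wl: for ch in strExam: if ch not in word: listAnswer.remove(word); break
  -- list.remove never raises here (each removed word is still present), so getD is never taken
  wl.foldl (fun ans word =>
    if strExam.toList.any (fun ch => !(PySem.Str.isIn (String.ofList [ch]) word)) then
      (PySem.List.remove? ans word).getD ans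
    else ans) listAnswer

-- ===== PORT B =====
def puzzle_b_alt (wordList : List String) : List String :=
  let required : PySem.Set Char := PySem.Set.ofList "lmnopqrstuv".toList
  wordList.filter (fun w =>
    pyStrIslower w && !(PySem.Str.isIn "-" w)
      && PySem.Set.issubset required (PySem.Set.ofList w.toList))

-- ===== PRECONDITION & SPEC =====
def Spec_puzzle_b (wordList : List String) (out : List String) : Prop := out = puzzle_b_alt wordList
instance (wordList : List String) (out : List String) : Decidable (Spec_puzzle_b wordList out) := by unfold Spec_puzzle_b; infer_instance

-- ===== CLAIM (what is proved, stated in full; the proofs are below) =====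
def Claim_equal_puzzle_b : Prop := ∀ (wordList : List String), Dom_puzzle_b wordList → Spec_puzzle_b wordList (puzzle_b wordList)

-- ===== LEMMAS AND PROOFS =====

-- good w: w contains every character of chs
def pvGood (chs : List Char) (w : String) : Bool :=
  chs.all (fun ch => PySem.Str.isIn (String.ofList [ch]) w)

-- remove? removes the first occurrence; if v is not in the prefix, it removes the head of the suffix
theorem remove?_append_self {α : Type} [DecidableEq α] (acc rest : List α) (v : α)
    (h : v ∉ acc) : PySem.List.remove? (acc ++ v :: rest) v = some (acc ++ rest) := by
  induction acc with
  | nil => simp [PySem.List.remove?_cons_self]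
  | cons a as ih =>
    have hne : a ≠ v := fun he => h (he ▸ List.mem_cons_self)
    have hv : v ∉ as := fun hm => h (List.mem_cons_of_mem _ hm)
    simp [PySem.List.remove?_cons_of_ne _ hne, ih hv]

-- invariant for A's loop: starting from (kept prefix) ++ rest and folding over rest,
-- where everything in acc is good, the result is acc ++ rest.filter good
theorem foldlA_invariant (chs : List Char) (acc rest : List String)
    (hacc : ∀ w ∈ acc, pvGood chs w = true) :
    rest.foldl (fun ans word =>
      if chs.any (fun ch => !(PySem.Str.isIn (String.ofList [ch]) word)) then
        (PySem.List.remove? ans word).getD ans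
      else ans) (acc ++ rest) = acc ++ rest.filter (pvGood chs) := by
  induction rest generalizing acc with
  | nil => simp
  | cons w rest ih =>
    by_cases hbad : chs.any (fun ch => !(PySem.Str.isIn (String.ofList [ch]) w)) = true
    · have hgoodw : pvGood chs w = false := by
        rcases List.any_eq_true.mp hbad with ⟨c, hc, hcw⟩
        simp only [Bool.not_eq_eq_eq_not, Bool.not_true] at hcw
        exact List.all_eq_false.mpr ⟨c, hc, by simpa using hcw⟩
      have hwacc : w ∉ acc := fun hm => by
        have := hacc w hm; rw [hgoodw] at this; exact Bool.false_ne_true this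
      have hrem := remove?_append_self acc rest w hwacc
      simp only [List.foldl_cons]
      rw [if_pos hbad, hrem]
      simp only [Option.getD_some]
      rw [ih acc hacc]
      simp [hgoodw]
    · have hgoodw : pvGood chs w = true := by
        refine List.all_eq_true.mpr (fun c hc => ?_)
        by_contra hcw
        exact hbad (List.any_eq_true.mpr ⟨c, hc, by simp_all⟩)
      have hext : ∀ x ∈ acc ++ [w], pvGood chs x = true := by
        intro x hx
        rcases List.mem_append.mp hx with h | h
        · exact hacc x h
        · simp at h; subst h; exact hgoodw
      have hsplit : acc ++ w :: rest = (acc ++ [w]) ++ rest := by simp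
      simp only [List.foldl_cons]
      rw [if_neg hbad, hsplit, ih (acc ++ [w]) hext]
      simp [hgoodw]

-- a one-character string is "in" w iff its character occurs in w's characters
theorem isIn_singleton (c : Char) (w : String) :
    PySem.Str.isIn (String.ofList [c]) w = decide (c ∈ w.toList) := by
  rcases h : decide (c ∈ w.toList) with _ | _
  · simp only [decide_eq_false_iff_not] at h
    refine (Bool.eq_false_iff.mpr ?_)
    intro habs
    rcases (PySem.Str.isIn_iff_infix _ _).mp habs with hin
    have : c ∈ w.toList := hin.sublist.subset (by simp)
    exact h this
  · simp only [decide_eq_true_eq] at h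
    rcases List.mem_iff_append.mp h with ⟨s, t, hst⟩
    exact (PySem.Str.isIn_iff_infix _ _).mpr ⟨s, t, by simp [hst]⟩

-- B's subset test coincides with A's "contains every required character"
theorem issubset_eq_pvGood (chs : List Char) (w : String) :
    PySem.Set.issubset (PySem.Set.ofList chs) (PySem.Set.ofList w.toList) = pvGood chs w := by
  rcases hg : pvGood chs w with _ | _
  · refine Bool.eq_false_iff.mpr (fun habs => ?_)
    rcases List.all_eq_false.mp hg with ⟨c, hc, hcw⟩
    have hmem : c ∈ PySem.Set.ofList chs := (PySem.Set.mem_ofList _ _).mpr hc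
    have := (PySem.Set.issubset_iff _ _).mp habs c hmem
    have hcm : c ∈ w.toList := (PySem.Set.mem_ofList _ _).mp this
    rw [isIn_singleton, decide_eq_true_eq] at hcw
    exact hcw hcm
  · refine (PySem.Set.issubset_iff _ _).mpr (fun c hc => ?_)
    have hc' : c ∈ chs := (PySem.Set.mem_ofList _ _).mp hc
    have := List.all_eq_true.mp hg c hc'
    rw [isIn_singleton, decide_eq_true_eq] at this
    exact (PySem.Set.mem_ofList _ _).mpr this

-- ===== VERDICT (by name: the statement is the Claim_ definition above) =====
theorem puzzle_b_spec : Claim_equal_puzzle_b := by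
  intro wordList _
  unfold Spec_puzzle_b puzzle_b puzzle_b_alt
  have hA := foldlA_invariant ("lmnopqrstuv".toList) []
      (wordList.filter (fun x => pyStrIslower x && !(PySem.Str.isIn "-" x))) (by simp)
  simp only [List.nil_append] at hA
  rw [hA, List.filter_filter]
  apply List.filter_congr
  intro w _
  rw [issubset_eq_pvGood]
  simp [Bool.and_comm, Bool.and_left_comm]
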